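-- pv_equiv track=rewrite | github.com/Teteration/Information-Retrieval | invertedIndex.py | ValidationSet
-- ===== SOURCE A (Python) =====
-- def ValidationSet(docs):
--     # input  =>  {"DocID": {"Body": ,"Name": }}
--     # output =>  {'fileName1': [DocId1, DocId2, DocId3], 'fileName2': [DocId4, DocId5, DocId6]}
--
--     ValidationSet = {}
--     for DocId in docs.keys():
--         fileName = docs[DocId]["Name"][5:]
--
--         if fileName in ValidationSet.keys():
--             ValidationSet[fileName].append(DocId)
--         else:
--             ValidationSet[fileName] = [DocId]
--
--
--     return ValidationSet
-- ===== SOURCE B (Python) =====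
-- def ValidationSet(docs):
--     # Group DocIds by filename in one comprehension pass over a precomputed
--     # DocId -> filename map: keys appear at first occurrence, each group is
--     # gathered by a scan over the map (same order as encounter order).
--     names = {DocId: docs[DocId]["Name"][5:] for DocId in docs}
--     result = {}
--     for fn in names.values():
--         if fn not in result:
--             result[fn] = [d for d, f in names.items() if f == fn]
--     return result
-- ===== Notes on version B (the rewrite author's own statement) =====
-- stated objective: alternative
-- what changed: Replaces the incremental dict-of-growing-lists (conditional append/create per DocId) by a precomputed DocId->filename map followed by a grouping pass that emits each whole group, gathered by a comprehension scan, at the filename's first occurrence.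
import Mathlib
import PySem

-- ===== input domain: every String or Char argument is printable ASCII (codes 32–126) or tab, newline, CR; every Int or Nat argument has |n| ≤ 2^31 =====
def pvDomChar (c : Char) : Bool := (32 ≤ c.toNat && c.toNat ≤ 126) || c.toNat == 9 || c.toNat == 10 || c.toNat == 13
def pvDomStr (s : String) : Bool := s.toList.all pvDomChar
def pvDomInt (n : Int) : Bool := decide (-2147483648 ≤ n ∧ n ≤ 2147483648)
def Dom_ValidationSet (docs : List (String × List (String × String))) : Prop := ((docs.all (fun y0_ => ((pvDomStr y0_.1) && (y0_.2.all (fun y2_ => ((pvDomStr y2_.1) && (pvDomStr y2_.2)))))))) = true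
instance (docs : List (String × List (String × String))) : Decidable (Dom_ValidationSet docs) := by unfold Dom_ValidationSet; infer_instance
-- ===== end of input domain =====

-- B groups DocIds by filename via a precomputed DocId→filename map and a per-filename
-- gathering scan, instead of A's incremental append-or-create dict loop (objective: alternative).

-- ===== PORT A =====
-- docs[DocId]["Name"][5:]; 'none' marks the KeyError Python raises when "Name" is absent
def pvName? (v : List (String × String)) : Option String :=
  ((PySem.Dict.ofList v).get? "Name").map (fun nm => PySem.Str.slice nm (some 5) none)

def ValidationSet (docs : List (String × List (String × String))) : List (String × List String) :=
  ((PySem.Dict.ofList docs).items.foldl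
    (fun (vs : PySem.Dict String (List String)) p =>
      match pvName? p.2 with
      | none => vs          -- KeyError in Python: outside Pre_, value irrelevant
      | some fn =>
        if vs.contains fn then vs.modify fn [] (fun cur => cur ++ [p.1])
        else vs.insert fn [p.1])
    PySem.Dict.empty).items

-- ===== PORT B =====
-- the 'for fn in names.values(): if fn not in result: result[fn] = [d for d, f in names.items() if f == fn]' loop
def pvGroupByName (names : List (String × String)) : List (String × List String) :=
  names.foldl
    (fun (res : List (String × List String)) p =>
      if (res.map Prod.fst).contains p.2 then res
      else res ++ [(p.2, (names.filter (fun q => q.2 == p.2)).map Prod.fst)])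
    []

def ValidationSet_alt (docs : List (String × List (String × String))) : List (String × List String) :=
  pvGroupByName
    ((PySem.Dict.ofList docs).items.filterMap
      (fun p => (pvName? p.2).map (fun fn => (p.1, fn))))

-- ===== PRECONDITION & SPEC =====
-- Pre_ excludes exactly the inputs where some document lacks a "Name" key: there Python A raises KeyError.
def Pre_ValidationSet (docs : List (String × List (String × String))) : Prop :=
  (docs.all (fun p => p.2.any (fun q => q.1 == "Name"))) = true
instance (docs : List (String × List (String × String))) : Decidable (Pre_ValidationSet docs) := by unfold Pre_ValidationSet; infer_instance

def pvWitness_ValidationSet : (List (String × List (String × String))) :=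
  [("d1", [("Name", "docs/a.txt"), ("Body", "x")]), ("d2", [("Name", "docs/a.txt")]), ("d3", [("Name", "docs/b.txt")])]

def Spec_ValidationSet (docs : List (String × List (String × String))) (out : List (String × List String)) : Prop := out = ValidationSet_alt docs
instance (docs : List (String × List (String × String))) (out : List (String × List String)) : Decidable (Spec_ValidationSet docs out) := by unfold Spec_ValidationSet; infer_instance

-- ===== CLAIM (what is proved, stated in full; the proofs are below) =====
def Claim_equal_ValidationSet : Prop := ∀ (docs : List (String × List (String × String))), Dom_ValidationSet docs → Pre_ValidationSet docs → Spec_ValidationSet docs (ValidationSet docs)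

-- ===== LEMMAS AND PROOFS =====

-- B's grouping loop emits, at each filename's first occurrence, the whole group gathered from 'names'
theorem lemB (g : String → List String) (l : List (String × String)) :
    l.foldl (fun (res : List (String × List String)) p =>
      if (res.map Prod.fst).contains p.2 then res else res ++ [(p.2, g p.2)]) []
    = (PySem.Set.ofList (l.map (fun q => q.2))).map (fun k => (k, g k)) := by
  induction l using List.reverseRecOn with
  | nil => rfl
  | append_singleton l p ih =>
    rw [List.foldl_append, ih]
    simp only [List.foldl_cons, List.foldl_nil, List.map_append, List.map_cons, List.map_nil,
      PySem.Set.ofList_append_singleton, List.map_map]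
    have hfst : List.map (Prod.fst ∘ fun k => (k, g k)) (PySem.Set.ofList (List.map (fun q => q.2) l))
        = PySem.Set.ofList (List.map (fun q => q.2) l) := by simp [Function.comp_def]
    by_cases hm : p.2 ∈ PySem.Set.ofList (List.map (fun q => q.2) l)
    · rw [if_pos (by rw [hfst]; simpa using hm), PySem.Set.add_of_mem hm]
    · rw [if_neg (by rw [hfst]; simpa using hm), PySem.Set.add_of_not_mem hm, List.map_append]
      simp

theorem lemB' (ns : List (String × String)) :
    pvGroupByName ns
    = (PySem.Set.ofList (ns.map (fun q => q.2))).map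
        (fun k => (k, (ns.filter (fun q => q.2 == k)).map Prod.fst)) := by
  unfold pvGroupByName
  exact lemB (fun k => (ns.filter (fun q => q.2 == k)).map Prod.fst) ns

-- A's modify-loop produces the same grouping, via the PySem Dict grouping lemmas
theorem lemA (ns : List (String × String)) :
    (ns.foldl (fun (vs : PySem.Dict String (List String)) p =>
        vs.modify p.2 [] (fun cur => cur ++ [p.1])) PySem.Dict.empty).items
    = (PySem.Set.ofList (ns.map (fun q => q.2))).map
        (fun k => (k, (ns.filter (fun q => q.2 == k)).map Prod.fst)) := by
  have hswap : ns.foldl (fun (vs : PySem.Dict String (List String)) p =>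
        vs.modify p.2 [] (fun cur => cur ++ [p.1])) PySem.Dict.empty
      = (ns.map Prod.swap).foldl (fun (vs : PySem.Dict String (List String)) q =>
        vs.modify q.1 [] (fun cur => cur ++ [q.2])) PySem.Dict.empty := by
    rw [List.foldl_map]
    rfl
  rw [hswap]
  set ms := ns.map Prod.swap with hms
  have hnd : ((ms).foldl (fun (vs : PySem.Dict String (List String)) q =>
        vs.modify q.1 [] (fun cur => cur ++ [q.2])) PySem.Dict.empty).keys.Nodup := by
    exact PySem.Dict.nodup_keys_foldl_modify_key ms Prod.fst [] _ _ PySem.Dict.nodup_keys_empty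
  rw [PySem.Dict.items_eq_map_keys _ hnd []]
  have hkeys : ((ms).foldl (fun (vs : PySem.Dict String (List String)) q =>
        vs.modify q.1 [] (fun cur => cur ++ [q.2])) PySem.Dict.empty).keys
      = PySem.Set.ofList (ms.map Prod.fst) := by
    rw [PySem.Dict.keys_foldl_modify_key]
    simp only [PySem.Dict.keys_empty]
    rw [PySem.Set.update_nil_left]
  rw [hkeys]
  have hmsfst : ms.map Prod.fst = ns.map (fun q => q.2) := by
    simp [hms, List.map_map, Function.comp]
  rw [hmsfst]
  apply List.map_congr_left
  intro k hk
  have hg : ((ms).foldl (fun (vs : PySem.Dict String (List String)) q =>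
        vs.modify q.1 [] (fun cur => cur ++ [q.2])) PySem.Dict.empty).getD k []
      = (ms.filter (fun q => q.1 == k)).map (fun q => q.2) := by
    rw [PySem.Dict.getD_foldl_modify_append]
    simp [PySem.Dict.getD_empty]
  rw [hg]
  have : ms.filter (fun q => q.1 == k) = (ns.filter (fun q => q.2 == k)).map Prod.swap := by
    simp [hms, List.filter_map, Function.comp_def]
  rw [this]
  simp [List.map_map, Function.comp_def]

theorem get?_foldl_insert_isSome (k : String) (l : List (String × String)) :
    ∀ d : PySem.Dict String String, ((d.get? k).isSome = true ∨ l.any (fun q => q.1 == k) = true) →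
    (((l.foldl (fun d p => d.insert p.1 p.2) d).get? k).isSome = true) := by
  induction l with
  | nil => intro d h; simpa using h
  | cons q l ih =>
    intro d h
    simp only [List.foldl_cons]
    apply ih
    by_cases hk : k = q.1
    · left; subst hk; simp [PySem.Dict.get?_insert_self]
    · rw [PySem.Dict.get?_insert_of_ne _ _ hk]
      rcases h with h | h
      · exact Or.inl h
      · simp only [List.any_cons, Bool.or_eq_true] at h
        rcases h with h | h
        · exact absurd (by simpa using h : q.1 = k).symm hk
        · exact Or.inr h

theorem values_foldl_insert (l : List (String × List (String × String))) :
    ∀ (d : PySem.Dict String (List (String × String))) v,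
      v ∈ (l.foldl (fun d p => d.insert p.1 p.2) d).values → v ∈ d.values ∨ ∃ q ∈ l, v = q.2 := by
  induction l with
  | nil => intro d v h; exact Or.inl h
  | cons q l ih =>
    intro d v h
    rcases ih _ v h with h' | ⟨r, hr, hv⟩
    · rcases PySem.Dict.mem_values_insert _ _ _ _ h' with h'' | h''
      · exact Or.inr ⟨q, by simp, h''⟩
      · exact Or.inl h''
    · exact Or.inr ⟨r, by simp [hr], hv⟩

theorem insert_eq_modify (d : PySem.Dict String (List String)) (k x : String) (h : d.contains k = false) :
    d.insert k [x] = d.modify k [] (fun cur => cur ++ [x]) := by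
  simp [PySem.Dict.modify, PySem.Dict.getD_of_not_contains (h := h)]

theorem pre_isSome (docs : List (String × List (String × String)))
    (hpre : Pre_ValidationSet docs) :
    ∀ p ∈ (PySem.Dict.ofList docs).items, (pvName? p.2).isSome = true := by
  intro p hp
  have hv : p.2 ∈ (PySem.Dict.ofList docs).values := by
    simp only [PySem.Dict.values]
    exact List.mem_map_of_mem hp
  rcases values_foldl_insert docs PySem.Dict.empty p.2 hv with h | ⟨q, hq, hv2⟩
  · simp [PySem.Dict.empty, PySem.Dict.values] at h
  · have hany : (q.2.any (fun r => r.1 == "Name")) = true := by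
      simp only [Pre_ValidationSet, List.all_eq_true] at hpre
      exact hpre q hq
    have hsome : (((PySem.Dict.ofList q.2).get? "Name").isSome) = true :=
      get?_foldl_insert_isSome "Name" q.2 PySem.Dict.empty (Or.inr hany)
    simp only [pvName?, hv2, Option.isSome_map]
    exact hsome

theorem main_eq (docs : List (String × List (String × String)))
    (hpre : Pre_ValidationSet docs) : ValidationSet docs = ValidationSet_alt docs := by
  have hsome := pre_isSome docs hpre
  set ds := (PySem.Dict.ofList docs).items with hds
  have hnames : ds.filterMap (fun p => (pvName? p.2).map (fun fn => (p.1, fn)))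
      = ds.map (fun p => (p.1, (pvName? p.2).getD "")) := by
    rw [List.filterMap_congr (g := fun p => some (p.1, (pvName? p.2).getD ""))]
    · simp
    · intro p hp
      obtain ⟨fn, hfn⟩ := Option.isSome_iff_exists.mp (hsome p hp)
      rw [hfn]; rfl
  have hA : ds.foldl
      (fun (vs : PySem.Dict String (List String)) p =>
        match pvName? p.2 with
        | none => vs
        | some fn =>
          if vs.contains fn then vs.modify fn [] (fun cur => cur ++ [p.1])
          else vs.insert fn [p.1])
      PySem.Dict.empty
      = ds.foldl (fun (vs : PySem.Dict String (List String)) p =>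
          vs.modify ((pvName? p.2).getD "") [] (fun cur => cur ++ [p.1])) PySem.Dict.empty := by
    apply PySem.List.foldl_congr_mem
    intro vs p hp
    obtain ⟨fn, hfn⟩ := Option.isSome_iff_exists.mp (hsome p hp)
    rw [hfn]
    simp only [Option.getD_some]
    by_cases hc : vs.contains fn
    · simp [hc]
    · simp only [hc, if_neg Bool.false_ne_true]
      exact insert_eq_modify vs fn p.1 (by simpa using hc)
  have hmap : ds.foldl (fun (vs : PySem.Dict String (List String)) p =>
          vs.modify ((pvName? p.2).getD "") [] (fun cur => cur ++ [p.1])) PySem.Dict.empty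
      = (ds.map (fun p => (p.1, (pvName? p.2).getD ""))).foldl
          (fun (vs : PySem.Dict String (List String)) q =>
            vs.modify q.2 [] (fun cur => cur ++ [q.1])) PySem.Dict.empty := by
    rw [List.foldl_map]
  unfold ValidationSet ValidationSet_alt
  rw [← hds, hnames, hA, hmap, lemA, lemB']

-- ===== VERDICT (by name: the statement is the Claim_ definition above) =====
theorem ValidationSet_spec : Claim_equal_ValidationSet := by
  intro docs _ hpre
  unfold Spec_ValidationSet
  exact main_eq docs hpre
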